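-- pv_equiv track=rewrite | github.com/gganduu/apriori | apriori.py | items_statistics
-- ===== SOURCE A (Python) =====
-- def items_statistics(transaction):
--     '''
--     this function is to gather item statistics
--     :param transaction: transaction database, patten is a list, each item is a set
--     :return: total items and total item numbers
--     '''
--     item_set = set()
--     max_len = 0
--     for item in transaction:
--         if max_len < len(item):
--             max_len = len(item)
--         item_set.update(item)
--     return item_set, max_len
-- ===== SOURCE B (Python) =====
-- def items_statistics(transaction):
--     '''
--     this function is to gather item statistics
--     :param transaction: transaction database, patten is a list, each item is a set
--     :return: total items and total item numbers
--     '''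
--     if len(transaction) == 0:
--         return set(), 0
--     if len(transaction) == 1:
--         only = transaction[0]
--         return set(only), len(only)
--     mid = len(transaction) // 2
--     left_set, left_max = items_statistics(transaction[:mid])
--     right_set, right_max = items_statistics(transaction[mid:])
--     return left_set | right_set, max(left_max, right_max)
-- ===== Notes on version B (the rewrite author's own statement) =====
-- stated objective: alternative
-- what changed: Replaces A's single left-to-right loop carrying two accumulators by a divide-and-conquer recursion: split the transaction list in half, recurse on each half, and combine with set union and max.
import Mathlib
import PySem

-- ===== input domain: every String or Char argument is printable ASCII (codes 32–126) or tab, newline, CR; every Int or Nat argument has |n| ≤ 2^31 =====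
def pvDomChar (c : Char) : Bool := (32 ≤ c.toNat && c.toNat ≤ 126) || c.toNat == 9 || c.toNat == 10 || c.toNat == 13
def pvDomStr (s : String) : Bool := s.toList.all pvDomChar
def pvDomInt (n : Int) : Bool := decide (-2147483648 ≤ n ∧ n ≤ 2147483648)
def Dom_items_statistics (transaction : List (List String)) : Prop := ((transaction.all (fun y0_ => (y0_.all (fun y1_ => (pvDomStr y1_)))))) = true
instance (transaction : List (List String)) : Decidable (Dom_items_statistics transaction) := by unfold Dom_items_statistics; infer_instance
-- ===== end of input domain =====

-- B replaces A's single left-to-right loop with two accumulators by a divide-and-conquer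
-- recursion: split the list in half, recurse, combine with set union and max (objective: alternative).

-- ===== PORT A =====
-- one loop carrying (item_set, max_len); per item: bump max_len, then item_set.update(item)
def items_statistics (transaction : List (List String)) : List String × Int :=
  transaction.foldl
    (fun acc item =>
      let max_len := if acc.2 < (item.length : Int) then (item.length : Int) else acc.2
      (PySem.Set.update acc.1 item, max_len))
    (PySem.Set.empty, 0)

-- ===== PORT B =====
-- divide and conquer: empty -> (set(), 0); singleton -> (set(only), len(only));
-- otherwise split at mid = len // 2, recurse on both halves, combine with | and max
def items_statistics_alt (transaction : List (List String)) : List String × Int :=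
  if _h0 : transaction.length = 0 then (PySem.Set.empty, 0)
  else if _h1 : transaction.length = 1 then
    let only := PySem.List.pyGetD transaction 0 []
    (PySem.Set.ofList only, (only.length : Int))
  else
    let mid : Int := PySem.Int.floordiv (transaction.length : Int) 2
    let l := items_statistics_alt (PySem.List.slice transaction none (some mid))
    let r := items_statistics_alt (PySem.List.slice transaction (some mid) none)
    (PySem.Set.union l.1 r.1, max l.2 r.2)
termination_by transaction.length
decreasing_by
  · rw [show PySem.Int.floordiv ((transaction.length : Int)) 2
        = ((transaction.length / 2 : Nat) : Int) from by
        exact_mod_cast PySem.Int.floordiv_natCast transaction.length 2,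
      PySem.List.slice_to_natCast]
    simp only [List.length_take]
    omega
  · rw [show PySem.Int.floordiv ((transaction.length : Int)) 2
        = ((transaction.length / 2 : Nat) : Int) from by
        exact_mod_cast PySem.Int.floordiv_natCast transaction.length 2,
      PySem.List.slice_from_natCast]
    simp only [List.length_drop]
    omega

-- ===== PRECONDITION & SPEC =====
def Spec_items_statistics (transaction : List (List String)) (out : List String × Int) : Prop := out = items_statistics_alt transaction
instance (transaction : List (List String)) (out : List String × Int) : Decidable (Spec_items_statistics transaction out) := by unfold Spec_items_statistics; infer_instance

-- ===== CLAIM (what is proved, stated in full; the proofs are below) =====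
def Claim_equal_items_statistics : Prop := ∀ (transaction : List (List String)), Dom_items_statistics transaction → Spec_items_statistics transaction (items_statistics transaction)

-- ===== LEMMAS AND PROOFS =====

-- the running max of the transaction lengths, as A's loop computes it
def pvMaxLen (ts : List (List String)) : Int :=
  ts.foldl (fun m it => max m (it.length : Int)) 0

theorem pvMaxLen_fold_init (ts : List (List String)) (m : Int) (hm : 0 ≤ m) :
    ts.foldl (fun m it => max m (it.length : Int)) m = max m (pvMaxLen ts) := by
  induction ts generalizing m with
  | nil => simp [pvMaxLen]; omega
  | cons t r ih =>
    simp only [pvMaxLen, List.foldl_cons] at *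
    rw [ih _ (by omega), ih (max 0 _) (by omega)]
    have : (0:Int) ≤ (t.length : Int) := by positivity
    omega

theorem pvMaxLen_nonneg (ts : List (List String)) : 0 ≤ pvMaxLen ts := by
  induction ts with
  | nil => simp [pvMaxLen]
  | cons t r ih =>
    simp only [pvMaxLen, List.foldl_cons] at *
    rw [pvMaxLen_fold_init _ _ (by positivity)]
    omega

theorem pvMaxLen_append (xs ys : List (List String)) :
    pvMaxLen (xs ++ ys) = max (pvMaxLen xs) (pvMaxLen ys) := by
  have h := pvMaxLen_fold_init ys (pvMaxLen xs) (pvMaxLen_nonneg xs)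
  simpa [pvMaxLen, List.foldl_append] using h

-- s.update(set(b)) adds the same elements as s.update(b)
theorem pvUpdate_ofList (s : PySem.Set String) (b : List String) :
    PySem.Set.update s (PySem.Set.ofList b) = PySem.Set.update s b := by
  rw [PySem.Set.update_eq_append_filter, PySem.Set.update_eq_append_filter,
    PySem.Set.ofList_ofList]

-- A's combined fold, characterised from any starting state
theorem items_statistics_char_aux (ts : List (List String)) (s : PySem.Set String) (m : Int) :
    ts.foldl
      (fun acc item =>
        let max_len := if acc.2 < (item.length : Int) then (item.length : Int) else acc.2
        (PySem.Set.update acc.1 item, max_len))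
      (s, m)
    = (PySem.Set.update s ts.flatten,
       ts.foldl (fun m it => max m (it.length : Int)) m) := by
  induction ts generalizing s m with
  | nil => simp [PySem.Set.update]
  | cons t r ih =>
    simp only [List.foldl_cons, List.flatten_cons]
    have hmax : (if m < (t.length : Int) then (t.length : Int) else m)
        = max m (t.length : Int) := by omega
    rw [hmax] at *
    rw [ih, PySem.Set.update_append]

theorem items_statistics_char (ts : List (List String)) :
    items_statistics ts = (PySem.Set.ofList ts.flatten, pvMaxLen ts) := by
  unfold items_statistics
  rw [items_statistics_char_aux]
  simp only [PySem.Set.empty]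
  rw [PySem.Set.update_nil_left]
  rfl

theorem items_statistics_alt_char (ts : List (List String)) :
    items_statistics_alt ts = (PySem.Set.ofList ts.flatten, pvMaxLen ts) := by
  induction ts using items_statistics_alt.induct with
  | case1 ts h0 =>
    rw [List.length_eq_zero_iff] at h0
    subst h0
    simp [items_statistics_alt, pvMaxLen, PySem.Set.empty]
  | case2 ts h0 h1 =>
    obtain ⟨t, ht⟩ := List.length_eq_one_iff.mp h1
    subst ht
    rw [items_statistics_alt]
    simp [pvMaxLen, PySem.List.pyGetD_zero_cons]
  | case3 ts h0 h1 _mid ihl ihr =>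
    rw [items_statistics_alt]
    simp only [h0, h1, dite_false]
    have hm : PySem.Int.floordiv (ts.length : Int) 2 = ((ts.length / 2 : Nat) : Int) := by
      exact_mod_cast PySem.Int.floordiv_natCast ts.length 2
    have hm2 : _mid = ((ts.length / 2 : Nat) : Int) := hm
    rw [hm2] at ihl ihr
    simp only [hm, PySem.List.slice_to_natCast, PySem.List.slice_from_natCast] at ihl ihr ⊢
    rw [ihl, ihr]
    have hsplit : (ts.take (ts.length / 2)).flatten ++ (ts.drop (ts.length / 2)).flatten
        = ts.flatten := by
      rw [← List.flatten_append, List.take_append_drop]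
    have htd : pvMaxLen (ts.take (ts.length / 2)) ⊔ pvMaxLen (ts.drop (ts.length / 2))
        = pvMaxLen ts := by
      rw [← pvMaxLen_append, List.take_append_drop]
    have hset : PySem.Set.union (PySem.Set.ofList (ts.take (ts.length / 2)).flatten)
        (PySem.Set.ofList (ts.drop (ts.length / 2)).flatten)
        = PySem.Set.ofList ts.flatten := by
      show PySem.Set.update _ _ = _
      rw [pvUpdate_ofList, ← PySem.Set.ofList_append, hsplit]
    rw [hset, htd]

-- ===== VERDICT (by name: the statement is the Claim_ definition above) =====
theorem items_statistics_spec : Claim_equal_items_statistics := by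
  intro transaction _
  unfold Spec_items_statistics
  rw [items_statistics_char, items_statistics_alt_char]
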